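-- pv_equiv track=rewrite | github.com/niksavis/burndown-chart | data/active_work_search.py | _parse_field_value_groups
-- ===== SOURCE A (Python) =====
-- from typing import Any, Dict, List, Optional, Set
--
-- def _parse_field_value_groups(raw_values: str) -> List[List[str]]:
--     """Parse value expression using ';' as OR and ',' as AND within a field."""
--     groups: List[List[str]] = []
--     for or_group in _split_unquoted(raw_values, ";"):
--         and_values = [
--             _normalize_value_token(part)
--             for part in _split_unquoted(or_group, ",")
--             if _normalize_value_token(part)
--         ]
--         if and_values:
--             groups.append(and_values)
--     return groups
--
-- def _split_unquoted(raw_text: str, delimiter: str) -> List[str]: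
--     values: List[str] = []
--     token: List[str] = []
--     in_quote = False
--
--     for char in raw_text:
--         if char == '"':
--             in_quote = not in_quote
--             token.append(char)
--             continue
--
--         if not in_quote and char == delimiter:
--             values.append("".join(token))
--             token = []
--             continue
--
--         token.append(char)
--
--     values.append("".join(token))
--     return values
--
-- def _normalize_value_token(raw_value: str) -> str:
--     normalized = raw_value.strip().lower()
--     if len(normalized) >= 2 and normalized.startswith('"') and normalized.endswith('"'):
--         normalized = normalized[1:-1]
--     return normalized.strip()
-- ===== SOURCE B (Python) =====
-- def _parse_field_value_groups(raw_values: str):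
--     """Single quote-aware pass over raw_values instead of two nested splits."""
--     groups = []
--     group = []
--     token = []
--     in_quote = False
--     for char in raw_values:
--         if char == '"':
--             in_quote = not in_quote
--             token.append(char)
--         elif not in_quote and char == ";":
--             group.append("".join(token))
--             token = []
--             groups.append(group)
--             group = []
--         elif not in_quote and char == ",":
--             group.append("".join(token))
--             token = []
--         else:
--             token.append(char)
--     group.append("".join(token))
--     groups.append(group)
--
--     result = []
--     for raw_group in groups:
--         values = [v for v in (_normalize_value_token(t) for t in raw_group) if v]
--         if values:
--             result.append(values)
--     return result
--
--
-- def _normalize_value_token(raw_value: str) -> str: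
--     normalized = raw_value.strip().lower()
--     if len(normalized) >= 2 and normalized.startswith('"') and normalized.endswith('"'):
--         normalized = normalized[1:-1]
--     return normalized.strip()
-- ===== Notes on version B (the rewrite author's own statement) =====
-- stated objective: faster
-- what changed: Replaces the nested two-level quote-aware splitting (outer split on ';', then a second full scan of each piece splitting on ',') with a single character-by-character pass that maintains one shared quote flag and builds tokens, groups and the group list in one traversal, normalizing tokens once at the end.
import Mathlib
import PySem

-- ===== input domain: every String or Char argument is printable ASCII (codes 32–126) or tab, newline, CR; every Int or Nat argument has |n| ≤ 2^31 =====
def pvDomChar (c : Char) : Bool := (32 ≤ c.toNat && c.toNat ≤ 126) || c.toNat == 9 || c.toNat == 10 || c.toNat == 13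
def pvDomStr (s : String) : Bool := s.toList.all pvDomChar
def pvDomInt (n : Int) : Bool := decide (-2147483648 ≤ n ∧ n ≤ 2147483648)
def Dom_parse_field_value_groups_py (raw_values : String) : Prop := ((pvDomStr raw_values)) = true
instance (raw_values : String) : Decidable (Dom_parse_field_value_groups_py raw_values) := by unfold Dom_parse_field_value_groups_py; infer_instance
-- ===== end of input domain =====

-- B replaces A's two nested quote-aware splits with one single-pass scanner (objective: faster by a constant factor — one traversal instead of two).

-- ===== PORT A =====
-- helper _normalize_value_token (shared module helper, used verbatim by both Pythons)
def normalizeValueToken (raw_value : String) : String :=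
  let normalized := PySem.Str.lower (PySem.Str.strip raw_value)
  let normalized :=
    if 2 ≤ PySem.Str.len normalized ∧ PySem.Str.startswith normalized "\"" = true ∧ PySem.Str.endswith normalized "\"" = true then
      PySem.Str.slice normalized (some 1) (some (-1))
    else normalized
  PySem.Str.strip normalized

-- one step of _split_unquoted's for-loop: state (values, token, in_quote)
def splitStep (delimiter : Char) (st : List String × List Char × Bool) (c : Char) : List String × List Char × Bool :=
  let (values, token, in_quote) := st
  if c = '"' then (values, token ++ [c], !in_quote)
  else if in_quote = false ∧ c = delimiter then (values ++ [String.ofList token], [], in_quote)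
  else (values, token ++ [c], in_quote)

def splitUnquoted (raw_text : String) (delimiter : Char) : List String :=
  let st := raw_text.toList.foldl (splitStep delimiter) ([], [], false)
  st.1 ++ [String.ofList st.2.1]

def parse_field_value_groups_py (raw_values : String) : List (List String) :=
  (splitUnquoted raw_values ';').foldl
    (fun groups or_group =>
      let and_values :=
        ((splitUnquoted or_group ',').filter (fun part => normalizeValueToken part ≠ "")).map normalizeValueToken
      if and_values = [] then groups else groups ++ [and_values])
    []

-- ===== PORT B =====
-- one step of B's single-pass scanner: state (groups, group, token, in_quote)
def scanStep (st : List (List String) × List String × List Char × Bool) (c : Char) :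
    List (List String) × List String × List Char × Bool :=
  let (groups, group, token, in_quote) := st
  if c = '"' then (groups, group, token ++ [c], !in_quote)
  else if in_quote = false ∧ c = ';' then (groups ++ [group ++ [String.ofList token]], [], [], in_quote)
  else if in_quote = false ∧ c = ',' then (groups, group ++ [String.ofList token], [], in_quote)
  else (groups, group, token ++ [c], in_quote)

def parse_field_value_groups_py_alt (raw_values : String) : List (List String) :=
  let st := raw_values.toList.foldl scanStep ([], [], [], false)
  let raw := st.1 ++ [st.2.1 ++ [String.ofList st.2.2.1]]
  raw.foldl
    (fun result raw_group =>
      let values := (raw_group.map normalizeValueToken).filter (fun v => v ≠ "")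
      if values = [] then result else result ++ [values])
    []

-- ===== PRECONDITION & SPEC =====
def Spec_parse_field_value_groups_py (raw_values : String) (out : List (List String)) : Prop := out = parse_field_value_groups_py_alt raw_values
instance (raw_values : String) (out : List (List String)) : Decidable (Spec_parse_field_value_groups_py raw_values out) := by unfold Spec_parse_field_value_groups_py; infer_instance

-- ===== CLAIM (what is proved, stated in full; the proofs are below) =====
def Claim_equal_parse_field_value_groups_py : Prop := ∀ (raw_values : String), Dom_parse_field_value_groups_py raw_values → Spec_parse_field_value_groups_py raw_values (parse_field_value_groups_py raw_values)

-- ===== LEMMAS AND PROOFS =====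

-- Reference recursion for _split_unquoted: the tokens (as char lists) of cs split at
-- unquoted `d`, starting with quote state `inq`.
def SA (d : Char) : List Char → Bool → List (List Char)
  | [], _ => [[]]
  | c :: cs, inq =>
    if c = '"' then (SA d cs (!inq)).modifyHead (c :: ·)
    else if inq = false ∧ c = d then [] :: SA d cs false
    else (SA d cs inq).modifyHead (c :: ·)

-- Reference recursion for B's scanner: groups of tokens.
def NB : List Char → Bool → List (List (List Char))
  | [], _ => [[[]]]
  | c :: cs, inq =>
    if c = '"' then (NB cs (!inq)).modifyHead (·.modifyHead (c :: ·))
    else if inq = false ∧ c = ';' then [[]] :: NB cs false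
    else if inq = false ∧ c = ',' then (NB cs inq).modifyHead ([] :: ·)
    else (NB cs inq).modifyHead (·.modifyHead (c :: ·))

theorem SA_ne_nil (d : Char) (cs : List Char) (inq : Bool) : SA d cs inq ≠ [] := by
  induction cs generalizing inq with
  | nil => simp [SA]
  | cons c cs ih =>
    simp only [SA]
    split_ifs with h1 h2
    · cases h : SA d cs (!inq) with
      | nil => exact absurd h (ih _)
      | cons a as => simp [h, List.modifyHead]
    · simp
    · cases h : SA d cs inq with
      | nil => exact absurd h (ih _)
      | cons a as => simp [h, List.modifyHead]

theorem NB_eq_nest (cs : List Char) (inq : Bool) :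
    NB cs inq =
      match SA ';' cs inq with
      | [] => []
      | p :: rest => SA ',' p inq :: rest.map (fun q => SA ',' q false) := by
  induction cs generalizing inq with
  | nil => simp [NB, SA]
  | cons c cs ih =>
    simp only [NB, SA]
    by_cases h1 : c = '"'
    · simp only [h1, if_pos rfl]
      rw [ih]
      cases h : SA ';' cs (!inq) with
      | nil => exact absurd h (SA_ne_nil _ _ _)
      | cons p rest =>
        simp [List.modifyHead, SA, h1]
    · by_cases h2 : inq = false ∧ c = ';'
      · have hc : ¬ (inq = false ∧ c = ',') := by rintro ⟨_, rfl⟩; exact absurd h2.2 (by decide)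
        simp only [if_neg h1, if_pos h2, if_neg hc]
        rw [ih]
        cases h : SA ';' cs false with
        | nil => exact absurd h (SA_ne_nil _ _ _)
        | cons p rest => simp [SA, h2.1, h2.2]
      · by_cases h3 : inq = false ∧ c = ','
        · simp only [if_neg h1, if_neg h2, if_pos h3]
          rw [ih]
          cases h : SA ';' cs inq with
          | nil => exact absurd h (SA_ne_nil _ _ _)
          | cons p rest =>
            simp [List.modifyHead, SA, h1, h3.1, h3.2]
        · simp only [if_neg h1, if_neg h2, if_neg h3]
          rw [ih]
          cases h : SA ';' cs inq with
          | nil => exact absurd h (SA_ne_nil _ _ _)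
          | cons p rest =>
            simp [List.modifyHead, SA, h1, h2, h3]

theorem modifyHead_comp {α : Type} (f g : α → α) (l : List α) :
    (l.modifyHead g).modifyHead f = l.modifyHead (fun x => f (g x)) := by
  cases l <;> simp

theorem modifyHead_id' {α : Type} (l : List α) : l.modifyHead (fun x => x) = l := by
  cases l <;> simp

theorem foldA_eq (d : Char) (cs : List Char) (vs : List String) (tok : List Char) (inq : Bool) :
    (cs.foldl (splitStep d) (vs, tok, inq)).1
        ++ [String.ofList (cs.foldl (splitStep d) (vs, tok, inq)).2.1]
      = vs ++ ((SA d cs inq).modifyHead (tok ++ ·)).map String.ofList := by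
  induction cs generalizing vs tok inq with
  | nil => simp [SA]
  | cons c cs ih =>
    simp only [List.foldl_cons, splitStep]
    by_cases h1 : c = '"'
    · subst h1
      rw [if_pos rfl, ih]
      simp [SA, modifyHead_comp, Function.comp, Function.comp_def]
    · by_cases h2 : inq = false ∧ c = d
      · obtain ⟨hq, hc⟩ := h2
        subst hq; subst hc
        rw [if_neg h1, if_pos ⟨rfl, rfl⟩, ih]
        cases h : SA c cs false with
        | nil => exact absurd h (SA_ne_nil _ _ _)
        | cons p rest => simp [SA, h1, h]
      · rw [if_neg h1, if_neg h2, ih]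
        simp [SA, h1, h2, modifyHead_comp, Function.comp, Function.comp_def]

theorem foldB_eq (cs : List Char) (gs : List (List String)) (g : List String)
    (tok : List Char) (inq : Bool) :
    (cs.foldl scanStep (gs, g, tok, inq)).1
        ++ [(cs.foldl scanStep (gs, g, tok, inq)).2.1
              ++ [String.ofList (cs.foldl scanStep (gs, g, tok, inq)).2.2.1]]
      = gs ++ (match NB cs inq with
          | [] => []
          | grp :: rest => (g ++ (grp.modifyHead (tok ++ ·)).map String.ofList) :: rest.map (·.map String.ofList)) := by
  induction cs generalizing gs g tok inq with
  | nil => simp [NB]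
  | cons c cs ih =>
    simp only [List.foldl_cons, scanStep]
    by_cases h1 : c = '"'
    · subst h1
      rw [if_pos rfl, ih]
      simp only [NB, if_pos rfl]
      cases h : NB cs (!inq) with
      | nil => simp [h]
      | cons grp rest => simp [h, modifyHead_comp, Function.comp, Function.comp_def]
    · by_cases h2 : inq = false ∧ c = ';'
      · obtain ⟨hq, hc⟩ := h2
        subst hq; subst hc
        rw [if_neg h1, if_pos ⟨rfl, rfl⟩, ih]
        simp only [NB, if_neg h1, if_pos (And.intro rfl rfl)]
        cases h : NB cs false with
        | nil => simp [h]
        | cons grp rest => simp [h, modifyHead_id']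
      · by_cases h3 : inq = false ∧ c = ','
        · obtain ⟨hq, hc⟩ := h3
          subst hq; subst hc
          have h2' : ¬ (false = false ∧ ',' = ';') := by simp
          rw [if_neg h1, if_neg h2', if_pos ⟨rfl, rfl⟩, ih]
          simp only [NB, if_neg h1, if_neg h2', if_pos (And.intro rfl rfl)]
          cases h : NB cs false with
          | nil => simp [h]
          | cons grp rest => simp [h, modifyHead_id']
        · rw [if_neg h1, if_neg h2, if_neg h3, ih]
          simp only [NB, if_neg h1, if_neg h2, if_neg h3]
          cases h : NB cs inq with
          | nil => simp [h]
          | cons grp rest => simp [h, modifyHead_comp, Function.comp, Function.comp_def]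

theorem filter_map_comm (l : List String) (f : String → String) :
    ((l.filter (fun x => f x ≠ "")).map f) = (l.map f).filter (fun v => v ≠ "") := by
  induction l with
  | nil => rfl
  | cons x xs ih =>
    simp only [ne_eq, decide_not] at ih
    by_cases h : f x = "" <;> simp [List.filter, h, ih]

theorem splitUnquoted_eq_SA (s : String) (d : Char) :
    splitUnquoted s d = (SA d s.toList false).map String.ofList := by
  have h := foldA_eq d s.toList [] [] false
  simpa [splitUnquoted, modifyHead_id'] using h

theorem NB_false_eq (cs : List Char) :
    NB cs false = (SA ';' cs false).map (fun p => SA ',' p false) := by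
  rw [NB_eq_nest]
  cases h : SA ';' cs false with
  | nil => exact absurd h (SA_ne_nil _ _ _)
  | cons p rest => simp

theorem alt_eq_foldSA (raw : String) :
    parse_field_value_groups_py_alt raw =
      ((SA ';' raw.toList false).map (fun p => (SA ',' p false).map String.ofList)).foldl
        (fun result raw_group =>
          let values := (raw_group.map normalizeValueToken).filter (fun v => v ≠ "")
          if values = [] then result else result ++ [values]) [] := by
  unfold parse_field_value_groups_py_alt
  have h := foldB_eq raw.toList [] [] [] false
  simp only at h ⊢
  rw [h, NB_false_eq]
  cases hS : SA ';' raw.toList false with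
  | nil => exact absurd hS (SA_ne_nil _ _ _)
  | cons p rest =>
    simp [modifyHead_id', List.map_map, Function.comp_def]

theorem a_eq_foldSA (raw : String) :
    parse_field_value_groups_py raw =
      (SA ';' raw.toList false).foldl
        (fun groups p =>
          let and_values :=
            ((((SA ',' p false).map String.ofList).filter
                (fun part => normalizeValueToken part ≠ "")).map normalizeValueToken)
          if and_values = [] then groups else groups ++ [and_values]) [] := by
  unfold parse_field_value_groups_py
  rw [splitUnquoted_eq_SA, List.foldl_map]
  congr 1
  funext groups p
  rw [splitUnquoted_eq_SA]
  simp

-- ===== VERDICT (by name: the statement is the Claim_ definition above) =====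
theorem parse_field_value_groups_py_spec : Claim_equal_parse_field_value_groups_py := by
  intro raw _
  unfold Spec_parse_field_value_groups_py
  rw [a_eq_foldSA, alt_eq_foldSA, List.foldl_map]
  congr 1
  funext groups p
  simp only
  rw [filter_map_comm]
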